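-- pv_equiv track=rewrite | github.com/VirgilSurin/projet-graphe | recuit/main.py | get_init_solution
-- ===== SOURCE A (Python) =====
-- def split(x, n):
--     """
--     given a number x, will split it in n equal part.
--     If not possible, it will be the "most equal part possible".
--     """
--     res = []
--     if x%n == 0:
--         # just need to put the result of x//n n times in res.
--         part = x//n
--         for i in range(n):
--             res.append(part)
--     else:
--         # stolen from : https://www.geeksforgeeks.org/split-the-number-into-n-parts-such-that-difference-between-the-smallest-and-the-largest-part-is-minimum/
--         # upto n-(x % n) the values
--         # will be x/n
--         # after that the values
--         # will be (x/n) + 1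
--         zp = n - (x % n)
--         pp = x//n
--         for i in range(n):
--             if(i >= zp):
--                 res.append(pp+1)
--             else:
--                 res.append(pp)
--     return res
--
-- def get_init_solution(N, B, E, input_numbers):
--     sol=[]
--     for i in range(N):
--         sol.append([input_numbers[i]])
--     for i in range(B * E - N) :
--         index=i%N
--         end = len(sol[index])-1
--         num = sol[index][end]
--         (a,b) = split(num,2)
--         sol[index][end] = a
--         sol[index].append(b)
--     return sol
-- ===== SOURCE B (Python) =====
-- def get_init_solution(N, B, E, input_numbers):
--     # Closed form: after its splits, row j is the telescoping differences of
--     # the ceiling halvings c_i = ceil(x / 2**i); no split/halving loop at all.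
--     M = B * E - N
--     if M > 0:
--         q, r = M // N, M % N
--     else:
--         q, r = 0, 0
--     sol = []
--     for j in range(N):
--         k = q + (1 if j < r else 0)
--         x = input_numbers[j]
--         ceils = [-(-x >> i) for i in range(k + 1)]
--         sol.append([ceils[i] - ceils[i + 1] for i in range(k)] + [ceils[k]])
--     return sol
-- ===== Notes on version B (the rewrite author's own statement) =====
-- stated objective: alternative
-- what changed: B computes each row in closed form: row j is the telescoping differences of the ceiling halvings ceil(x/2^i) obtained by bit-shifts, with the per-row count from one divmod, so no splitting/halving loop runs at all, unlike A's round-robin simulation of B*E-N individual splits.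
import Mathlib
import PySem

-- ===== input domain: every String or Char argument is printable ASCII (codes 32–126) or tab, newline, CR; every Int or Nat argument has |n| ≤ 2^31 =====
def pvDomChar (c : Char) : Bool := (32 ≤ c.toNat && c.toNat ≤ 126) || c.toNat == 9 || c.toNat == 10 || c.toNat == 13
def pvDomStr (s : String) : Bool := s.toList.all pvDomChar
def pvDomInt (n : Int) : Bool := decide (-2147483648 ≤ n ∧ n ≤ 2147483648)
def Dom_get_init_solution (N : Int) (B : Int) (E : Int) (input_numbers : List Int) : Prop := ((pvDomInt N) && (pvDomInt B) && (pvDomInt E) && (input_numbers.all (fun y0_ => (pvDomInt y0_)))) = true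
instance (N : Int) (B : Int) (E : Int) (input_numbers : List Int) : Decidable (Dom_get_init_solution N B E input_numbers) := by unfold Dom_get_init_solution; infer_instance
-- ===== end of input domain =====

-- B computes each row in closed form as telescoping differences of the ceiling
-- halvings ceil(x/2^i) (bit shifts), replacing A's simulation of B*E-N splits.

-- ===== PORT A =====
-- port of the module helper `split`
def pySplit (x n : Int) : List Int :=
  if PySem.Int.mod x n = 0 then
    (PySem.List.pyRange 0 n 1).foldl
      (fun res _ => res ++ [PySem.Int.floordiv x n]) []
  else
    let zp := n - PySem.Int.mod x n
    let pp := PySem.Int.floordiv x n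
    (PySem.List.pyRange 0 n 1).foldl
      (fun res i => if zp ≤ i then res ++ [pp + 1] else res ++ [pp]) []

-- the body of A's second for-loop
def aBody (N : Int) (sol : List (List Int)) (i : Int) : List (List Int) :=
  let index := PySem.Int.mod i N
  let lst := PySem.List.pyGetD sol index []
  let e : Int := (lst.length : Int) - 1
  let num := PySem.List.pyGetD lst e 0
  let ab := pySplit num 2
  let a := PySem.List.pyGetD ab 0 0
  let b := PySem.List.pyGetD ab 1 0
  PySem.List.pySetD sol index (PySem.List.pySetD lst e a ++ [b])

def get_init_solution (N : Int) (B : Int) (E : Int) (input_numbers : List Int) : List (List Int) :=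
  let sol := (PySem.List.pyRange 0 N 1).foldl
    (fun sol i => sol ++ [[PySem.List.pyGetD input_numbers i 0]]) []
  (PySem.List.pyRange 0 (B * E - N) 1).foldl (aBody N) sol

-- ===== PORT B =====
-- Python's  v >> i  for the nonnegative i used here is Lean's floor shift v >>> i.toNat (exact).
def pyShr (v : Int) (i : Int) : Int := v >>> i.toNat

def get_init_solution_alt (N : Int) (B : Int) (E : Int) (input_numbers : List Int) : List (List Int) :=
  let M := B * E - N
  let q := if 0 < M then PySem.Int.floordiv M N else 0
  let r := if 0 < M then PySem.Int.mod M N else 0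
  (PySem.List.pyRange 0 N 1).foldl (fun sol j =>
    let k := q + (if j < r then 1 else 0)
    let x := PySem.List.pyGetD input_numbers j 0
    let ceils := (PySem.List.pyRange 0 (k + 1) 1).map (fun i => -(pyShr (-x) i))
    sol ++ [((PySem.List.pyRange 0 k 1).map (fun i =>
        PySem.List.pyGetD ceils i 0 - PySem.List.pyGetD ceils (i + 1) 0)) ++
      [PySem.List.pyGetD ceils k 0]]) []

-- ===== PRECONDITION & SPEC =====
-- Exactly the inputs where Python A returns: indexing input_numbers[0..N-1] needs
-- N ≤ len(input_numbers) whenever 0 < N, and the second loop (run iff 0 < B*E-N)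
-- indexes sol[i%N], which raises unless 0 < N.
def Pre_get_init_solution (N : Int) (B : Int) (E : Int) (input_numbers : List Int) : Prop :=
  (0 < N → N ≤ (input_numbers.length : Int)) ∧ (0 < B * E - N → 0 < N)
instance (N : Int) (B : Int) (E : Int) (input_numbers : List Int) : Decidable (Pre_get_init_solution N B E input_numbers) := by unfold Pre_get_init_solution; infer_instance

def pvWitness_get_init_solution : Int × Int × Int × List Int := (2, 2, 2, [5, 3])

def Spec_get_init_solution (N : Int) (B : Int) (E : Int) (input_numbers : List Int) (out : List (List Int)) : Prop := out = get_init_solution_alt N B E input_numbers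
instance (N : Int) (B : Int) (E : Int) (input_numbers : List Int) (out : List (List Int)) : Decidable (Spec_get_init_solution N B E input_numbers out) := by unfold Spec_get_init_solution; infer_instance

-- ===== CLAIM (what is proved, stated in full; the proofs are below) =====
def Claim_equal_get_init_solution : Prop := ∀ (N : Int) (B : Int) (E : Int) (input_numbers : List Int), Dom_get_init_solution N B E input_numbers → Pre_get_init_solution N B E input_numbers → Spec_get_init_solution N B E input_numbers (get_init_solution N B E input_numbers)

-- ===== LEMMAS AND PROOFS =====

-- one split of the last element, as A performs it on a row
def stepB (lst : List Int) : List Int :=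
  let x := PySem.List.pyGetD lst (-1) 0
  lst.set (lst.length - 1) (PySem.Int.floordiv x 2) ++ [x - PySem.Int.floordiv x 2]

-- the i-th ceiling halving ceil(x / 2^i), as B's port computes it
def cS (x : Int) (i : Nat) : Int := -((-x) >>> i)

-- how often index j is hit by A's round-robin loop after m iterations
def cnt (n j : Nat) : Nat → Nat
  | 0 => 0
  | m + 1 => cnt n j m + (if m % n = j then 1 else 0)

theorem pySplit_two (x : Int) :
    pySplit x 2 = [PySem.Int.floordiv x 2, x - PySem.Int.floordiv x 2] := by
  have hr : PySem.List.pyRange 0 2 1 = [0, 1] := by decide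
  have hdm := PySem.Int.floordiv_mul_add_mod x 2
  by_cases hm : PySem.Int.mod x 2 = 0
  · rw [hm] at hdm
    simp only [pySplit, hm, hr, List.foldl_cons, List.foldl_nil, List.nil_append]
    norm_num
    omega
  · have h0 := PySem.Int.mod_nonneg x (b := 2) (by norm_num)
    have h2 := PySem.Int.mod_lt x (b := 2) (by norm_num)
    have hm1 : PySem.Int.mod x 2 = 1 := by omega
    rw [hm1] at hdm
    simp only [pySplit, hr, hm1, List.foldl_cons, List.foldl_nil,
      List.nil_append]
    norm_num
    omega

theorem set_last_append {α : Type} (L : List α) (v w : α) :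
    (L ++ [v]).set ((L ++ [v]).length - 1) w = L ++ [w] := by
  induction L with
  | nil => rfl
  | cons a t ih => simp_all

theorem stepB_append (L : List Int) (v : Int) :
    stepB (L ++ [v]) = L ++ [PySem.Int.floordiv v 2, v - PySem.Int.floordiv v 2] := by
  simp only [stepB, PySem.List.pyGetD_neg_one_append_singleton, set_last_append,
    List.append_assoc, List.cons_append, List.nil_append]

theorem aStep_eq (lst : List Int) (h : lst ≠ []) :
    PySem.List.pySetD lst ((lst.length : Int) - 1)
        (PySem.List.pyGetD (pySplit (PySem.List.pyGetD lst ((lst.length : Int) - 1) 0) 2) 0 0)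
      ++ [PySem.List.pyGetD (pySplit (PySem.List.pyGetD lst ((lst.length : Int) - 1) 0) 2) 1 0]
    = stepB lst := by
  have hn : 0 < lst.length := List.length_pos_iff.mpr h
  have hget : PySem.List.pyGetD lst ((lst.length : Int) - 1) 0
      = PySem.List.pyGetD lst (-1) 0 := by
    rw [PySem.List.pyGetD_eq_getElem lst (i := (lst.length : Int) - 1) 0 (by omega) (by omega),
      PySem.List.pyGetD_neg_one lst 0 h, List.getLast_eq_getElem]
    congr 1
    omega
  rw [hget, pySplit_two,
    PySem.List.pySetD_of_nonneg lst (i := (lst.length : Int) - 1) _ (by omega)]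
  have htn : (((lst.length : Int) - 1)).toNat = lst.length - 1 := by omega
  rw [htn]
  simp [stepB, PySem.List.pyGetD, PySem.List.pyGet?, PySem.List.pyIdx?]

theorem stepB_ne_nil (l : List Int) : stepB l ≠ [] := by
  simp [stepB]

theorem iter_stepB_ne_nil (k : Nat) (l : List Int) (h : l ≠ []) : stepB^[k] l ≠ [] := by
  cases k with
  | zero => simpa
  | succ k => rw [Function.iterate_succ_apply']; exact stepB_ne_nil _

theorem cnt_closed (n j : Nat) (hn : 0 < n) (hj : j < n) :
    ∀ m, cnt n j m = m / n + (if j < m % n then 1 else 0) := by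
  intro m
  induction m with
  | zero => simp [cnt]
  | succ m ih =>
    have hdm := Nat.div_add_mod m n
    have hlt : m % n < n := Nat.mod_lt m hn
    by_cases hc : m % n + 1 = n
    · have hm1 : m + 1 = n * (m / n + 1) := by rw [Nat.mul_add, Nat.mul_one]; omega
      have hdiv : (m + 1) / n = m / n + 1 := by
        rw [hm1, Nat.mul_div_cancel_left _ hn]
      have hmod : (m + 1) % n = 0 := by rw [hm1]; exact Nat.mul_mod_right n _
      show cnt n j m + (if m % n = j then 1 else 0) = _
      rw [ih, hdiv, hmod]
      split_ifs <;> omega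
    · have hlt2 : m % n + 1 < n := by omega
      have hm1 : m + 1 = n * (m / n) + (m % n + 1) := by omega
      have hdiv : (m + 1) / n = m / n := by
        rw [hm1, Nat.mul_add_div hn, Nat.div_eq_of_lt hlt2]
        omega
      have hmod : (m + 1) % n = m % n + 1 := by
        rw [hm1, Nat.mul_add_mod, Nat.mod_eq_of_lt hlt2]
      show cnt n j m + (if m % n = j then 1 else 0) = _
      rw [ih, hdiv, hmod]
      split_ifs <;> omega

theorem loopA (n : Nat) (hn : 0 < n) (init : List (List Int))
    (hlen : init.length = n) (hne : ∀ l ∈ init, l ≠ []) (m : Nat) :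
    (PySem.List.pyRange 0 (m : Int) 1).foldl (aBody (n : Int)) init
      = init.mapIdx (fun j x => stepB^[cnt n j m] x) := by
  induction m with
  | zero =>
    rw [PySem.List.pyRange_one_eq_nil (by simp)]
    simp [cnt, List.mapIdx_eq_zipIdx_map]
  | succ m ih =>
    have hcast : ((m + 1 : Nat) : Int) = (m : Int) + 1 := by push_cast; ring
    rw [hcast, PySem.List.pyRange_one_succ_right (by positivity), List.foldl_append,
      ih, List.foldl_cons, List.foldl_nil]
    have hjlt : m % n < n := Nat.mod_lt m hn
    have hmn : m % n < init.length := by omega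
    have hidx : PySem.Int.mod (m : Int) (n : Int) = ((m % n : Nat) : Int) :=
      PySem.Int.mod_natCast m n
    have hmnS : m % n < (init.mapIdx (fun j x => stepB^[cnt n j m] x)).length := by
      simpa using hmn
    have hSel : (init.mapIdx (fun j x => stepB^[cnt n j m] x))[m % n]
        = stepB^[cnt n (m % n) m] init[m % n] := List.getElem_mapIdx
    have hlne : (init.mapIdx (fun j x => stepB^[cnt n j m] x))[m % n] ≠ [] := by
      rw [hSel]
      exact iter_stepB_ne_nil _ _ (hne _ (List.getElem_mem hmn))
    have hget : PySem.List.pyGetD (init.mapIdx (fun j x => stepB^[cnt n j m] x))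
        ((m % n : Nat) : Int) [] = (init.mapIdx (fun j x => stepB^[cnt n j m] x))[m % n] := by
      rw [PySem.List.pyGetD_natCast, List.getD_eq_getElem _ _ hmnS]
    simp only [aBody, hidx, hget]
    rw [aStep_eq _ hlne, PySem.List.pySetD_natCast]
    apply List.ext_getElem
    · simp
    · intro j hj1 hj2
      have hjn : j < n := by
        rw [List.length_set] at hj1
        simpa [hlen] using hj1
      rw [List.getElem_set]
      by_cases hjc : m % n = j
      · subst hjc
        rw [if_pos rfl, hSel]
        simp only [List.getElem_mapIdx]
        have hone : cnt n (m % n) (m + 1) = cnt n (m % n) m + 1 := by simp [cnt]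
        rw [hone, Function.iterate_succ_apply']
      · rw [if_neg hjc]
        simp only [List.getElem_mapIdx]
        have hsame : cnt n j (m + 1) = cnt n j m := by simp [cnt, hjc]
        rw [hsame]

theorem shift_eq_fd (x : Int) (i : Nat) : x >>> i = PySem.Int.floordiv x (2 ^ i) := by
  rw [Int.shiftRight_eq_div_pow, PySem.Int.floordiv_eq_ediv_of_pos (by positivity)]
  push_cast
  ring_nf

theorem cS_zero (x : Int) : cS x 0 = x := by
  simp [cS, Int.shiftRight_eq_div_pow]

theorem cS_succ (x : Int) (i : Nat) :
    cS x (i + 1) = cS x i - PySem.Int.floordiv (cS x i) 2 := by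
  have e1 : ∀ j : Nat, cS x j = -((-x) / (2 ^ j : Int)) := by
    intro j
    rw [cS, shift_eq_fd, PySem.Int.floordiv_eq_ediv_of_pos (by positivity)]
  have e2 : PySem.Int.floordiv (cS x i) 2 = cS x i / 2 :=
    PySem.Int.floordiv_eq_ediv_of_pos (by norm_num)
  rw [e2]
  simp only [e1]
  have hcomp : (-x) / (2 ^ i : Int) / 2 = (-x) / (2 ^ (i + 1) : Int) := by
    rw [Int.ediv_ediv_of_nonneg (by positivity : (0 : Int) ≤ 2 ^ i), pow_succ]
  set a : Int := (-x) / (2 ^ i : Int)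
  rw [← hcomp]
  have h1 := Int.mul_ediv_add_emod a 2
  have h2 := Int.mul_ediv_add_emod (-a) 2
  have h3 := Int.emod_nonneg a (by norm_num : (2 : Int) ≠ 0)
  have h4 := Int.emod_lt_of_pos a (by norm_num : (0 : Int) < 2)
  have h5 := Int.emod_nonneg (-a) (by norm_num : (2 : Int) ≠ 0)
  have h6 := Int.emod_lt_of_pos (-a) (by norm_num : (0 : Int) < 2)
  omega

-- the closed form B computes: k splits of [x] = telescoping differences of cS
theorem rowClosed (x : Int) (k : Nat) :
    stepB^[k] [x]
      = (List.range k).map (fun i => cS x i - cS x (i + 1)) ++ [cS x k] := by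
  induction k with
  | zero => simp [cS_zero]
  | succ k ih =>
    rw [Function.iterate_succ_apply', ih, stepB_append, List.range_succ]
    have h1 : PySem.Int.floordiv (cS x k) 2 = cS x k - cS x (k + 1) := by
      rw [cS_succ]; ring
    rw [h1]
    simp

-- B's per-row expression (with its pyGetD-indexed ceils list) is that closed form
theorem portRow (x : Int) (kn : Nat) :
    ((PySem.List.pyRange 0 (kn : Int) 1).map (fun i =>
        PySem.List.pyGetD ((PySem.List.pyRange 0 ((kn : Int) + 1) 1).map
          (fun i => -(pyShr (-x) i))) i 0
      - PySem.List.pyGetD ((PySem.List.pyRange 0 ((kn : Int) + 1) 1).map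
          (fun i => -(pyShr (-x) i))) (i + 1) 0))
    ++ [PySem.List.pyGetD ((PySem.List.pyRange 0 ((kn : Int) + 1) 1).map
          (fun i => -(pyShr (-x) i))) (kn : Int) 0]
    = (List.range kn).map (fun i => cS x i - cS x (i + 1)) ++ [cS x kn] := by
  have hlast : PySem.List.pyGetD ((PySem.List.pyRange 0 ((kn : Int) + 1) 1).map
      (fun i => -(pyShr (-x) i))) (kn : Int) 0 = cS x kn := by
    rw [PySem.List.pyGetD_map_pyRange_of_nonneg _ _ _ _ (by positivity) (by omega)]
    simp [cS, pyShr]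
  rw [hlast]
  congr 1
  apply List.ext_getElem
  · simp [PySem.List.length_pyRange_one]
  · intro t ht1 ht2
    have htn : t < kn := by
      simpa [PySem.List.length_pyRange_one] using ht2
    have htr : t < (PySem.List.pyRange 0 (kn : Int) 1).length := by
      rw [PySem.List.length_pyRange_one]; omega
    have hrt : (PySem.List.pyRange 0 (kn : Int) 1)[t] = (t : Int) := by
      rw [PySem.List.getElem_pyRange_one]; ring
    simp only [List.getElem_map, hrt]
    rw [PySem.List.pyGetD_map_pyRange_of_nonneg _ _ _ _ (by positivity) (by omega)]
    have hc1 : ((t : Int) + 1) = ((t + 1 : Nat) : Int) := by push_cast; ring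
    rw [hc1, PySem.List.pyGetD_map_pyRange_of_nonneg _ _ _ _ (by positivity) (by omega)]
    simp [cS, pyShr]

-- ===== VERDICT (by name: the statement is the Claim_ definition above) =====
theorem get_init_solution_spec : Claim_equal_get_init_solution := by
  intro N B E xs _ hpre
  unfold Spec_get_init_solution
  by_cases hN : 0 < N
  · obtain ⟨n, rfl⟩ : ∃ n : Nat, (n : Int) = N := ⟨N.toNat, Int.toNat_of_nonneg (by omega)⟩
    have hn : 0 < n := by exact_mod_cast hN
    have hinitA : (PySem.List.pyRange 0 (n : Int) 1).foldl
        (fun sol i => sol ++ [[PySem.List.pyGetD xs i 0]]) ([] : List (List Int))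
        = (PySem.List.pyRange 0 (n : Int) 1).map (fun i => [PySem.List.pyGetD xs i 0]) := by
      rw [PySem.List.foldl_append_singleton_eq_map (fun i => [PySem.List.pyGetD xs i 0])]
      simp
    have hlen : ((PySem.List.pyRange 0 (n : Int) 1).map
        (fun i => [PySem.List.pyGetD xs i 0])).length = n := by
      simp [PySem.List.length_pyRange_one]
    have hne : ∀ l ∈ (PySem.List.pyRange 0 (n : Int) 1).map
        (fun i => [PySem.List.pyGetD xs i 0]), l ≠ [] := by
      intro l hl
      simp only [List.mem_map] at hl
      obtain ⟨i, _, rfl⟩ := hl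
      simp
    have hMr : PySem.List.pyRange 0 (B * E - (n : Int)) 1
        = PySem.List.pyRange 0 (((B * E - (n : Int)).toNat : Nat) : Int) 1 := by
      by_cases h : B * E - (n : Int) ≤ 0
      · rw [PySem.List.pyRange_one_eq_nil h, PySem.List.pyRange_one_eq_nil (by omega)]
      · rw [Int.toNat_of_nonneg (by omega)]
    have hA : get_init_solution (n : Int) B E xs
        = ((PySem.List.pyRange 0 (n : Int) 1).map
            (fun i => [PySem.List.pyGetD xs i 0])).mapIdx
          (fun j x => stepB^[cnt n j (B * E - (n : Int)).toNat] x) := by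
      unfold get_init_solution
      rw [hinitA, hMr]
      exact loopA n hn _ hlen hne (B * E - (n : Int)).toNat
    rw [hA]
    unfold get_init_solution_alt
    rw [PySem.List.foldl_append_singleton_eq_map]
    rw [List.nil_append]
    apply List.ext_getElem
    · simp [PySem.List.length_pyRange_one]
    · intro j hj1 hj2
      have hjn : j < n := by
        simpa [hlen] using hj1
      have hjr : j < (PySem.List.pyRange 0 (n : Int) 1).length := by
        rw [PySem.List.length_pyRange_one]; omega
      have hrj : (PySem.List.pyRange 0 (n : Int) 1)[j] = (j : Int) := by
        rw [PySem.List.getElem_pyRange_one]; ring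
      simp only [List.getElem_mapIdx, List.getElem_map, hrj]
      rw [rowClosed]
      set kc : Nat := cnt n j (B * E - (n : Int)).toNat with hkc
      have hk : (if 0 < B * E - (n : Int) then PySem.Int.floordiv (B * E - (n : Int)) (n : Int) else 0)
          + (if (j : Int) < (if 0 < B * E - (n : Int) then PySem.Int.mod (B * E - (n : Int)) (n : Int) else 0) then 1 else 0)
          = (kc : Int) := by
        by_cases hMp : 0 < B * E - (n : Int)
        · rw [if_pos hMp, if_pos hMp]
          obtain ⟨mN, hmN⟩ : ∃ mN : Nat, (mN : Int) = B * E - (n : Int) :=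
            ⟨(B * E - (n : Int)).toNat, Int.toNat_of_nonneg (by omega)⟩
          rw [← hmN, PySem.Int.floordiv_natCast, PySem.Int.mod_natCast, hkc, ← hmN,
            Int.toNat_natCast, cnt_closed n j hn hjn]
          push_cast
          split_ifs with h1 h2 h2
          · ring
          · exact absurd (by exact_mod_cast h1) h2
          · exact absurd (by exact_mod_cast h2) h1
          · ring
        · rw [if_neg hMp, if_neg hMp]
          have h0 : (B * E - (n : Int)).toNat = 0 := by omega
          rw [hkc, h0]
          simp [cnt]
      rw [hk]
      exact (portRow (PySem.List.pyGetD xs (j : Int) 0) kc).symm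
  · have hM0 : B * E - N ≤ 0 := by
      by_contra h
      exact hN (hpre.2 (by omega))
    unfold get_init_solution get_init_solution_alt
    rw [PySem.List.pyRange_one_eq_nil (b := N) (by omega),
      PySem.List.pyRange_one_eq_nil (b := B * E - N) hM0]
    simp
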